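-- pv_equiv track=rewrite | github.com/DragunWF/Competitive-Programming | CodeWars/python/6_kyu/sort_the_inner_content.py | sort_the_inner_content
-- ===== SOURCE A (Python) =====
-- def sort_the_inner_content(sentence: str) -> str:
--     words = sentence.split(" ")
--     output = []
--     for word in words:
--         if len(word) <= 2:
--             output.append(word)
--             continue
--         inner_content = word[1:len(word) - 1]
--         output.append(f"{word[0]}{''.join(sorted(inner_content, reverse=True))}{word[-1]}")
--     return " ".join(output)
-- ===== SOURCE B (Python) =====
-- def _emit(res, buf):
--     # flush one completed word into res
--     if len(buf) <= 2:
--         res.extend(buf)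
--     else:
--         res.append(buf[0])
--         counts = [0] * 256
--         for ch in buf[1:-1]:
--             counts[ord(ch)] += 1
--         for code in range(255, -1, -1):
--             res.append(chr(code) * counts[code])
--         res.append(buf[-1])
--
--
-- def sort_the_inner_content(sentence: str) -> str:
--     # single pass over the characters; each word's inner part is rebuilt by a
--     # counting sort over the 256-entry byte alphabet (no comparison sort, no split/join)
--     res = []
--     buf = []
--     for ch in sentence:
--         if ch == " ":
--             _emit(res, buf)
--             res.append(" ")
--             buf = []
--         else:
--             buf.append(ch)
--     _emit(res, buf)
--     return "".join(res)
-- ===== Notes on version B (the rewrite author's own statement) =====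
-- stated objective: alternative
-- what changed: B makes a single character-by-character pass with a word buffer (no split/join) and rebuilds each word's inner part by a counting sort over a fixed 256-entry alphabet instead of a comparison sort.
import Mathlib
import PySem

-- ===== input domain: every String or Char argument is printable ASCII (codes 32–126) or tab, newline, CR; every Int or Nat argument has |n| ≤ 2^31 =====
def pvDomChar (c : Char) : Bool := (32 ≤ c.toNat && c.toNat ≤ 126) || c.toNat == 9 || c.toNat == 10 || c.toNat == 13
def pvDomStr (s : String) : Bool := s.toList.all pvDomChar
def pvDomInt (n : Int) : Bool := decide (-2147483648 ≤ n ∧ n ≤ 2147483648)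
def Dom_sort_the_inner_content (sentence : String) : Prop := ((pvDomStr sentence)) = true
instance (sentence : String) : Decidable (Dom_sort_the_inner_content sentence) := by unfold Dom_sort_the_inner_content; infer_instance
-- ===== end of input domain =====

-- B replaces A's split/sort/join pipeline by a single character-by-character pass with a
-- word buffer, rebuilding each word's inner part by a counting sort over the 256-entry
-- byte alphabet; objective: alternative (no measured speed claim).

-- ===== PORT A =====
-- one word of A's loop body: len ≤ 2 kept, else first + sorted(inner, reverse=True) + last
def pvAWord (w : List Char) : List Char :=
  if w.length ≤ 2 then w
  else
    -- inner_content = word[1:len(word) - 1]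
    PySem.List.pyGetD w 0 ' ' ::
      (PySem.List.sorted (PySem.List.slice w (some 1) (some ((w.length : Int) - 1))) (fun c => c) true
        ++ [PySem.List.pyGetD w (-1) ' '])
      -- word[0] / word[-1] are in range here (length > 2), so pyGetD is exact

def sort_the_inner_content (sentence : String) : String :=
  -- sentence.split(" "): the separator " " is non-empty, so split? is `some` — getD is exact
  String.ofList (PySem.Chars.join [' ']
    (((PySem.Chars.split? sentence.toList [' ']).getD []).map pvAWord))

-- ===== PORT B =====
-- _emit(res, buf): flush one completed word into res (counting sort over 256 buckets)
def pvEmit (res : List Char) (buf : List Char) : List Char :=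
  if buf.length ≤ 2 then res ++ buf
  else
    -- counts = [0]*256; for ch in buf[1:-1]: counts[ord(ch)] += 1
    -- (ord(ch) < 256 on the ASCII domain, so the list index never raises; getD is exact)
    let counts : List Int :=
      (PySem.List.slice buf (some 1) (some (-1))).foldl
        (fun a ch => a.set ch.toNat (a.getD ch.toNat 0 + 1)) (List.replicate 256 0)
    -- res.append(buf[0]); for code in range(255,-1,-1): res.append(chr(code)*counts[code]); res.append(buf[-1])
    -- (buf[0]/buf[-1] in range since len > 2; chr(code)*n is replicate, counts nonneg)
    ((PySem.List.pyRange 255 (-1) (-1)).foldl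
        (fun r code => r ++ List.replicate (counts.getD code.toNat 0).toNat (Char.ofNat code.toNat))
        (res ++ [PySem.List.pyGetD buf 0 ' '])) ++ [PySem.List.pyGetD buf (-1) ' ']

-- the for-loop over the characters of sentence, with its two mutable lists res and buf
def pvLoop : List Char → List Char → List Char → List Char
  | [], res, buf => pvEmit res buf
  | c :: cs, res, buf =>
      if c = ' ' then pvLoop cs (pvEmit res buf ++ [' ']) []
      else pvLoop cs res (buf ++ [c])

def sort_the_inner_content_alt (sentence : String) : String :=
  String.ofList (pvLoop sentence.toList [] [])

-- ===== PRECONDITION & SPEC =====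
def Spec_sort_the_inner_content (sentence : String) (out : String) : Prop := out = sort_the_inner_content_alt sentence
instance (sentence : String) (out : String) : Decidable (Spec_sort_the_inner_content sentence out) := by unfold Spec_sort_the_inner_content; infer_instance

-- ===== CLAIM (what is proved, stated in full; the proofs are below) =====
def Claim_equal_sort_the_inner_content : Prop := ∀ (sentence : String), Dom_sort_the_inner_content sentence → Spec_sort_the_inner_content sentence (sort_the_inner_content sentence)

-- ===== LEMMAS AND PROOFS =====

-- reference recursion for splitting on a single space (proof-side only)
def pvSplit : List Char → List (List Char)
  | [] => [[]]
  | c :: cs => if c = ' ' then [] :: pvSplit cs else (pvSplit cs).modifyHead (c :: ·)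

theorem pvSplit_ne_nil (l : List Char) : pvSplit l ≠ [] := by
  induction l with
  | nil => simp [pvSplit]
  | cons c cs ih =>
    simp only [pvSplit]
    split_ifs
    · simp
    · cases h : pvSplit cs with
      | nil => exact absurd h ih
      | cons x xs => simp [List.modifyHead]

theorem pv_go_eq (fuel : Nat) : ∀ (l cur : List Char) (acc : List (List Char)), l.length < fuel →
    PySem.Chars.splitOn.go [' '] fuel l cur acc
      = acc.reverse ++ (pvSplit l).modifyHead (cur.reverse ++ ·) := by
  induction fuel with
  | zero => intro l cur acc h; omega
  | succ fuel ih =>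
    intro l cur acc h
    cases l with
    | nil => simp [PySem.Chars.splitOn.go, pvSplit, List.modifyHead]
    | cons c rest =>
      rw [PySem.Chars.splitOn.go]
      by_cases hc : c = ' '
      · subst hc
        have hpre : [' '].isPrefixOf (' ' :: rest) = true := by simp [List.isPrefixOf]
        rw [if_pos hpre]
        have : List.drop ([' '].length) (' ' :: rest) = rest := by simp
        rw [this, ih rest [] _ (by simpa using Nat.lt_of_succ_lt_succ h)]
        simp only [pvSplit]
        obtain ⟨x, xs, hx⟩ : ∃ x xs, pvSplit rest = x :: xs := by
          cases hps : pvSplit rest with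
          | nil => exact absurd hps (pvSplit_ne_nil rest)
          | cons x xs => exact ⟨x, xs, rfl⟩
        simp [hx, List.modifyHead]
      · have hpre : [' '].isPrefixOf (c :: rest) = false := by
          simp [List.isPrefixOf]
          exact fun h' => (hc h'.symm).elim
        rw [if_neg (by simp [hpre])]
        rw [ih rest (c :: cur) _ (by simpa using Nat.lt_of_succ_lt_succ h)]
        simp only [pvSplit, if_neg hc]
        obtain ⟨x, xs, hx⟩ : ∃ x xs, pvSplit rest = x :: xs := by
          cases hps : pvSplit rest with
          | nil => exact absurd hps (pvSplit_ne_nil rest)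
          | cons x xs => exact ⟨x, xs, rfl⟩
        simp [hx, List.modifyHead]

theorem pv_splitOn_eq (s : List Char) : PySem.Chars.splitOn s [' '] = pvSplit s := by
  rw [PySem.Chars.splitOn, pv_go_eq (s.length + 1) s [] [] (Nat.lt_succ_self _)]
  obtain ⟨x, xs, hx⟩ : ∃ x xs, pvSplit s = x :: xs := by
    cases hps : pvSplit s with
    | nil => exact absurd hps (pvSplit_ne_nil s)
    | cons x xs => exact ⟨x, xs, rfl⟩
  simp [hx, List.modifyHead]

theorem pvSplit_no_space (l : List Char) (h : ' ' ∉ l) : pvSplit l = [l] := by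
  induction l with
  | nil => rfl
  | cons c cs ih =>
    have hc : c ≠ ' ' := fun hc => h (hc ▸ List.mem_cons_self)
    have hcs : ' ' ∉ cs := fun hm => h (List.mem_cons_of_mem _ hm)
    simp [pvSplit, hc, ih hcs, List.modifyHead]

theorem pvSplit_space_append (pre cs : List Char) (h : ' ' ∉ pre) :
    pvSplit (pre ++ ' ' :: cs) = pre :: pvSplit cs := by
  induction pre with
  | nil => simp [pvSplit]
  | cons c t ih =>
    have hc : c ≠ ' ' := fun hc => h (hc ▸ List.mem_cons_self)
    have ht : ' ' ∉ t := fun hm => h (List.mem_cons_of_mem _ hm)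
    simp [pvSplit, hc, ih ht, List.modifyHead]

-- summing an indicator over a duplicate-free list of codes
theorem pv_sum_map_ite (l : List Nat) (hnd : l.Nodup) (a : Nat) (g : Nat → Nat) :
    (l.map (fun k => if k = a then g k else 0)).sum = if a ∈ l then g a else 0 := by
  induction l with
  | nil => simp
  | cons c t ih =>
    rcases List.nodup_cons.mp hnd with ⟨hct, hnt⟩
    by_cases hca : c = a
    · subst hca
      simp [hct, ih hnt]
    · have : (a ∈ c :: t) ↔ (a ∈ t) := by
        constructor
        · intro h; rcases List.mem_cons.mp h with h | h
          · exact absurd h.symm hca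
          · exact h
        · exact fun h => List.mem_cons_of_mem _ h
      simp [hca, ih hnt, this]

theorem pv_char_toNat_inj : Function.Injective Char.toNat :=
  StrictMono.injective fun _ _ h => h

theorem pv_toNat_ofNat (k : Nat) (h : k < 256) : (Char.ofNat k).toNat = k := by
  have hv : Nat.isValidChar k := Or.inl (by omega)
  rw [Char.ofNat, dif_pos hv]
  simp [Char.toNat, Char.ofNatAux]


-- the descending 256-bucket emission IS sorted(inner, reverse=True)
theorem pv_desc_buckets (inner : List Char) (h : ∀ c ∈ inner, c.toNat < 256) :
    PySem.List.sorted inner (fun c => c) true =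
      (((List.range 256).reverse.map
        (fun k => List.replicate (inner.countP (fun c => c.toNat = k)) (Char.ofNat k))).flatten) := by
  set ks := (List.range 256).reverse with hks
  have hks_nodup : ks.Nodup := List.nodup_reverse.mpr List.nodup_range
  have hmem_ks : ∀ k, k ∈ ks ↔ k < 256 := by
    intro k; rw [hks, List.mem_reverse, List.mem_range]
  have hcount : ∀ a : Char, inner.countP (fun c => c.toNat = a.toNat) = inner.count a := by
    intro a
    rw [List.count_eq_countP]
    apply List.countP_congr
    intro c _
    constructor
    · intro hc
      have hcn : c.toNat = a.toNat := by simpa using hc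
      have : c = a := pv_char_toNat_inj hcn
      simp [this]
    · intro hc
      have : c = a := by simpa using hc
      simp [this]
  -- the flattened buckets are a permutation of inner
  have hperm : ((ks.map
      (fun k => List.replicate (inner.countP (fun c => c.toNat = k)) (Char.ofNat k))).flatten).Perm inner := by
    rw [List.perm_iff_count]
    intro a
    rw [List.count_flatten, List.map_map]
    have hmapc : ks.map (List.count a ∘ fun k => List.replicate (inner.countP (fun c => c.toNat = k)) (Char.ofNat k)) =
        ks.map (fun k => if k = a.toNat then inner.countP (fun c => c.toNat = k) else 0) := by
      apply List.map_congr_left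
      intro k hk
      have hk256 : k < 256 := (hmem_ks k).mp hk
      simp only [Function.comp]
      rw [List.count_replicate]
      by_cases hka : k = a.toNat
      · subst hka
        have : Char.ofNat a.toNat = a := by
          have := pv_toNat_ofNat a.toNat hk256
          exact pv_char_toNat_inj this
        simp [this]
      · have : Char.ofNat k ≠ a := by
          intro he
          exact hka (by rw [← he, pv_toNat_ofNat k hk256])
        simp [this, hka]
    rw [hmapc, pv_sum_map_ite ks hks_nodup a.toNat (fun k => inner.countP (fun c => c.toNat = k))]
    by_cases ha : a.toNat < 256
    · rw [if_pos ((hmem_ks _).mpr ha), hcount]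
    · rw [if_neg (fun hm => ha ((hmem_ks _).mp hm))]
      have : a ∉ inner := fun hm => ha (h a hm)
      exact (List.count_eq_zero.mpr this).symm
  -- the flattened buckets are descending
  have hks_pw : ks.Pairwise (fun a b => b ≤ a) := by
    rw [hks, List.pairwise_reverse]
    exact List.pairwise_lt_range.imp (fun hab => Nat.le_of_lt hab)
  have hpw : ((ks.map
      (fun k => List.replicate (inner.countP (fun c => c.toNat = k)) (Char.ofNat k))).flatten).Pairwise
      (fun a b : Char => b ≤ a) := by
    rw [List.pairwise_flatten]
    constructor
    · intro l hl
      rcases List.mem_map.mp hl with ⟨k, _, rfl⟩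
      exact List.pairwise_replicate.mpr (Or.inr le_rfl)
    · rw [List.pairwise_map]
      refine hks_pw.imp_of_mem ?_
      intro k k' hk hk' hle x hx y hy
      rcases (List.mem_replicate.mp hx) with ⟨_, rfl⟩
      rcases (List.mem_replicate.mp hy) with ⟨_, rfl⟩
      show (Char.ofNat k').toNat ≤ (Char.ofNat k).toNat
      rw [pv_toNat_ofNat k ((hmem_ks k).mp hk), pv_toNat_ofNat k' ((hmem_ks k').mp hk')]
      exact hle
  -- a descending permutation of inner is sorted(inner, reverse=True)
  refine List.Perm.eq_of_pairwise ?_ (PySem.List.sorted_pairwise_rev inner (fun c => c)) hpw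
    ((PySem.List.sorted_perm inner (fun c => c) true).trans hperm.symm)
  intro a b _ _ h1 h2
  exact le_antisymm h2 h1

-- the counting pass: bucket k of the fold holds init[k] plus the number of chars of code k
theorem pv_counts_spec (l : List Char) (hl : ∀ c ∈ l, c.toNat < 256) :
    ∀ (init : List Int), init.length = 256 → ∀ k : Nat, k < 256 →
    (l.foldl (fun a ch => a.set ch.toNat (a.getD ch.toNat 0 + 1)) init).getD k 0
      = init.getD k 0 + (l.countP (fun c => c.toNat = k) : Int) := by
  induction l with
  | nil => intro init _ k _; simp
  | cons c t ih =>
    intro init hlen k hk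
    have hct : ∀ x ∈ t, x.toNat < 256 := fun x hx => hl x (List.mem_cons_of_mem _ hx)
    have hc256 : c.toNat < 256 := hl c List.mem_cons_self
    simp only [List.foldl_cons]
    rw [ih hct _ (by simp [hlen]) k hk]
    rw [List.countP_cons]
    by_cases hck : c.toNat = k
    · subst hck
      have : (List.set init c.toNat (init.getD c.toNat 0 + 1)).getD c.toNat 0 = init.getD c.toNat 0 + 1 := by
        rw [List.getD_eq_getElem?_getD, List.getElem?_set, if_pos rfl, if_pos (by omega)]
        rw [List.getD_eq_getElem?_getD, List.getElem?_eq_getElem (by omega)]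
        simp
      rw [this]
      simp only [decide_true]
      push_cast
      ring
    · have : (List.set init c.toNat (init.getD c.toNat 0 + 1)).getD k 0 = init.getD k 0 := by
        rw [List.getD_eq_getElem?_getD, List.getElem?_set, if_neg hck, List.getD_eq_getElem?_getD]
      rw [this]
      simp [hck]

set_option maxRecDepth 4096 in
theorem pv_codes : PySem.List.pyRange 255 (-1) (-1) = ((List.range 256).reverse).map (Nat.cast) := by
  decide

-- the two per-word bodies agree on ASCII words
set_option maxRecDepth 4096 in
theorem pvEmit_eq (res buf : List Char) (h : ∀ c ∈ buf, c.toNat < 256) :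
    pvEmit res buf = res ++ pvAWord buf := by
  unfold pvEmit pvAWord
  by_cases hlen : buf.length ≤ 2
  · simp [hlen]
  · simp only [hlen, if_false]
    have hc1 : PySem.List.clampIdx buf.length ((buf.length : Int) - 1) = buf.length - 1 := by
      have he : ((buf.length : Int) - 1) = (((buf.length - 1 : Nat)) : Int) := by omega
      rw [he, PySem.List.clampIdx_natCast]
      omega
    have hslice : PySem.List.slice buf (some 1) (some (-1))
        = PySem.List.slice buf (some 1) (some ((buf.length : Int) - 1)) := by
      simp [PySem.List.slice]
      rw [hc1]
    rw [hslice]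
    set inner := PySem.List.slice buf (some 1) (some ((buf.length : Int) - 1)) with hinner
    have hin : ∀ c ∈ inner, c.toNat < 256 :=
      fun c hc => h c (PySem.List.mem_of_mem_slice buf _ _ hc)
    have hbucket : ∀ k : Nat, k < 256 →
        (((inner.foldl (fun (a : List Int) ch => a.set ch.toNat (a.getD ch.toNat 0 + 1))
            (List.replicate 256 0)).getD k 0)).toNat = inner.countP (fun c => c.toNat = k) := by
      intro k hk
      rw [pv_counts_spec inner hin (List.replicate 256 0) (by simp) k hk]
      rw [List.getD_eq_getElem?_getD, List.getElem?_replicate, if_pos hk]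
      simp
    rw [pv_codes, List.foldl_append_eq_append, List.map_map]
    have hmap : ((List.range 256).reverse).map
          ((fun code : Int => List.replicate
              (((inner.foldl (fun (a : List Int) ch => a.set ch.toNat (a.getD ch.toNat 0 + 1))
                (List.replicate 256 0)).getD code.toNat 0)).toNat (Char.ofNat code.toNat)) ∘ (Nat.cast))
        = ((List.range 256).reverse).map
          (fun k => List.replicate (inner.countP (fun c => c.toNat = k)) (Char.ofNat k)) := by
      apply List.map_congr_left
      intro k hk
      have hk256 : k < 256 := by
        rw [List.mem_reverse, List.mem_range] at hk
        exact hk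
      simp only [Function.comp, Int.toNat_natCast]
      rw [hbucket k hk256]
    rw [hmap, ← pv_desc_buckets inner hin]
    simp

-- words of pvSplit never contain the separator
theorem pvJoin_cons (w : List Char) (ws : List (List Char)) (hne : ws ≠ []) (f : List Char → List Char) :
    PySem.Chars.join [' '] ((w :: ws).map f) = f w ++ ' ' :: PySem.Chars.join [' '] (ws.map f) := by
  cases ws with
  | nil => exact absurd rfl hne
  | cons y ys => simp [PySem.Chars.join_cons_cons]

-- loop invariant: the char loop computes A's join-of-mapped-split of (buf ++ cs)
theorem pvLoop_eq : ∀ (cs res buf : List Char), (∀ c ∈ cs, c.toNat < 256) →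
    (∀ c ∈ buf, c.toNat < 256) → ' ' ∉ buf →
    pvLoop cs res buf = res ++ PySem.Chars.join [' '] ((pvSplit (buf ++ cs)).map pvAWord) := by
  intro cs
  induction cs with
  | nil =>
    intro res buf _ hbuf hsp
    rw [List.append_nil]
    rw [pvSplit_no_space buf hsp]
    simp only [pvLoop, List.map_cons, List.map_nil, PySem.Chars.join_singleton]
    exact pvEmit_eq res buf hbuf
  | cons c cs ih =>
    intro res buf hcs hbuf hsp
    have hcs' : ∀ x ∈ cs, x.toNat < 256 := fun x hx => hcs x (List.mem_cons_of_mem _ hx)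
    by_cases hc : c = ' '
    · subst hc
      simp only [pvLoop]
      rw [ih (pvEmit res buf ++ [' ']) [] hcs' (by simp) (by simp)]
      rw [List.nil_append, pvSplit_space_append buf cs hsp]
      rw [pvJoin_cons buf (pvSplit cs) (pvSplit_ne_nil cs) pvAWord]
      rw [pvEmit_eq res buf hbuf]
      simp
    · simp only [pvLoop, if_neg hc]
      rw [ih res (buf ++ [c]) hcs'
        (by
          intro x hx
          rcases List.mem_append.mp hx with hx | hx
          · exact hbuf x hx
          · rw [List.mem_singleton.mp hx]; exact hcs c List.mem_cons_self)
        (by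
          intro hm
          rcases List.mem_append.mp hm with hm | hm
          · exact hsp hm
          · exact hc (List.mem_singleton.mp hm).symm)]
      rw [List.append_assoc]
      rfl

-- ===== VERDICT (by name: the statement is the Claim_ definition above) =====
theorem sort_the_inner_content_spec : Claim_equal_sort_the_inner_content := by
  intro sentence hdom
  unfold Spec_sort_the_inner_content sort_the_inner_content sort_the_inner_content_alt
  have hchars : ∀ c ∈ sentence.toList, c.toNat < 256 := by
    intro c hc
    have := List.all_eq_true.mp hdom c hc
    simp only [pvDomChar, Bool.or_eq_true, Bool.and_eq_true, decide_eq_true_eq, beq_iff_eq] at this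
    omega
  rw [pvLoop_eq sentence.toList [] [] hchars (by simp) (by simp)]
  have hsplit : PySem.Chars.split? sentence.toList [' '] = some (PySem.Chars.splitOn sentence.toList [' ']) := by
    simp [PySem.Chars.split?]
  rw [hsplit, Option.getD_some, pv_splitOn_eq]
  simp
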